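-- pv_equiv track=rewrite | github.com/cs294-domotics/lstm-learner | raw/utils/first_occurrences.py | find_devices
-- ===== SOURCE A (Python) =====
-- DESIRED_TYPES = ['L', 'D', 'M']
--
-- def find_devices(lines):
--     device_type_buckets = {}
--     device_first_occurrences = {}
--     device_count = 0
--     for line in lines:
--         if is_well_formed(line):
--             device = get_device(line)
--             device_type = get_device_type(device)
--             if device_type in DESIRED_TYPES:
--                 if device_type not in device_type_buckets:
--                     device_type_buckets[device_type] = [device]
--                     device_first_occurrences[device] = get_timestamp(line)
--                     device_count += 1
--                 else:
--                     if device not in device_type_buckets[device_type]: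
--                         device_type_buckets[device_type].append(device)
--                         device_first_occurrences[device] = get_timestamp(line)
--                         device_count += 1
--     return device_type_buckets, device_first_occurrences, device_count
--
-- def is_well_formed(line):
--     fields = line.split()
--     return (len(fields) >= 4)
--
-- def get_device(line):
--     return line.split()[2]
--
-- def get_device_type(device):
--     return device[0]
--
-- def get_timestamp(line):
--     fields = line.split()
--     return fields[0] + ' ' + fields[1]
-- ===== SOURCE B (Python) =====
-- DESIRED_TYPES = ['L', 'D', 'M']
--
-- def find_devices(lines):
--     # Collect every eligible occurrence together with its line index.
--     occurrences = []
--     for index, line in enumerate(lines):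
--         fields = line.split()
--         if len(fields) >= 4 and fields[2][0] in DESIRED_TYPES:
--             occurrences.append((index, fields[2], fields[0] + ' ' + fields[1]))
--     # Last write wins: traversing in reverse leaves each device mapped to its
--     # earliest occurrence, with no membership test at all.
--     earliest = {device: (index, timestamp)
--                 for index, device, timestamp in reversed(occurrences)}
--     # Recover first-occurrence order by sorting on the line index.
--     ordered = sorted(earliest.items(), key=lambda item: item[1][0])
--     device_first_occurrences = {}
--     device_type_buckets = {}
--     for device, (index, timestamp) in ordered:
--         device_first_occurrences[device] = timestamp
--         device_type_buckets.setdefault(device[0], []).append(device)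
--     return device_type_buckets, device_first_occurrences, len(ordered)
-- ===== Notes on version B (the rewrite author's own statement) =====
-- stated objective: alternative
-- what changed: B replaces A's single stateful loop with membership tests by a collect-reduce-sort pipeline: gather every eligible (line index, device, timestamp) occurrence, deduplicate with a last-write-wins dict comprehension over the reversed list (no membership test anywhere), sort the survivors by line index to restore first-occurrence order, then emit the buckets, the timestamp dict and the count from that ordered list.
import Mathlib
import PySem

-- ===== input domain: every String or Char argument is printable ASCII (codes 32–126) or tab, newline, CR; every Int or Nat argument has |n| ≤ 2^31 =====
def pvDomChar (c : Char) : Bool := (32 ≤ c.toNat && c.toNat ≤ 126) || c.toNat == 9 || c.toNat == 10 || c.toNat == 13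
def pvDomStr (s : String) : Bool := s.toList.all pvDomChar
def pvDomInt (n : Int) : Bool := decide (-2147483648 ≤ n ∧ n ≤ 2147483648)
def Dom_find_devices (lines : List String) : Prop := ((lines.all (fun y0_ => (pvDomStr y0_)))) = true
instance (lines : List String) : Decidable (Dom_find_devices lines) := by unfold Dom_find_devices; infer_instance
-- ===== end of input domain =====

-- B replaces A's single stateful loop by a collect / reverse-overwrite-dedup / sort-by-index
-- pipeline; return-value equivalence only, neither version mutates its argument.

-- ===== PORT A =====
def DESIRED_TYPES : List String := ["L", "D", "M"]

def is_well_formed (line : String) : Bool := decide (4 ≤ (PySem.Str.split₀ line).length)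

-- fields[2]; the .getD "" is never reached: callers guard with is_well_formed (≥ 4 fields)
def get_device (line : String) : String :=
  (PySem.List.pyGet? (PySem.Str.split₀ line) 2).getD ""

-- device[0] as a one-character string; the .getD [] is never reached (split₀ tokens are nonempty)
def get_device_type (device : String) : String :=
  String.ofList (((PySem.Str.pyGet? device 0).map (fun c => [c])).getD [])

-- fields[0] + ' ' + fields[1]
def get_timestamp (line : String) : String :=
  PySem.Str.join " " [(PySem.List.pyGet? (PySem.Str.split₀ line) 0).getD "",
                      (PySem.List.pyGet? (PySem.Str.split₀ line) 1).getD ""]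

def find_devices_step
    (st : PySem.Dict String (List String) × PySem.Dict String String × Int)
    (line : String) :
    PySem.Dict String (List String) × PySem.Dict String String × Int :=
  if is_well_formed line then
    let device := get_device line
    let device_type := get_device_type device
    if DESIRED_TYPES.contains device_type then
      if st.1.contains device_type = false then
        (st.1.insert device_type [device], st.2.1.insert device (get_timestamp line), st.2.2 + 1)
      else
        if (st.1.getD device_type []).contains device = false then
          (st.1.modify device_type [] (fun b => b ++ [device]),
           st.2.1.insert device (get_timestamp line), st.2.2 + 1)
        else st
    else st
  else st

def find_devices (lines : List String) :
    (List (String × List String)) × (List (String × String)) × Int :=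
  let r := lines.foldl find_devices_step (PySem.Dict.empty, PySem.Dict.empty, 0)
  (r.1.items, r.2.1.items, r.2.2)

-- ===== PORT B =====
-- device[0] in B's code (one-character string; devices are split₀ tokens, hence nonempty)
def first_char (device : String) : String :=
  String.ofList (((PySem.Str.pyGet? device 0).map (fun c => [c])).getD [])

-- loop 1 body: occurrences.append((index, fields[2], fields[0] + ' ' + fields[1]))
def collect_step (acc : List (Int × String × String)) (p : Int × String) :
    List (Int × String × String) :=
  let fields := PySem.Str.split₀ p.2
  if 4 ≤ fields.length then
    if DESIRED_TYPES.contains (first_char ((PySem.List.pyGet? fields 2).getD "")) then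
      acc ++ [(p.1, (PySem.List.pyGet? fields 2).getD "",
               PySem.Str.join " " [(PySem.List.pyGet? fields 0).getD "",
                                   (PySem.List.pyGet? fields 1).getD ""])]
    else acc
  else acc

-- loop 2 body (the final for): grow both dicts from one ordered item
def pair_step
    (st : PySem.Dict String String × PySem.Dict String (List String))
    (p : String × Int × String) :
    PySem.Dict String String × PySem.Dict String (List String) :=
  (st.1.insert p.1 p.2.2,
   (st.2.setdefault (first_char p.1) []).modify (first_char p.1) [] (fun xs => xs ++ [p.1]))

def find_devices_alt (lines : List String) :
    (List (String × List String)) × (List (String × String)) × Int :=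
  let occurrences := (PySem.List.enumerate lines).foldl collect_step []
  let earliest := occurrences.reverse.foldl
      (fun d (t : Int × String × String) => d.insert t.2.1 (t.1, t.2.2)) PySem.Dict.empty
  let ordered := PySem.List.sorted earliest.items (fun item => item.2.1) false
  let final := ordered.foldl pair_step (PySem.Dict.empty, PySem.Dict.empty)
  (final.2.items, final.1.items, (ordered.length : Int))

-- ===== PRECONDITION & SPEC =====
def Spec_find_devices (lines : List String) (out : (List (String × List String)) × (List (String × String)) × Int) : Prop := out = find_devices_alt lines
instance (lines : List String) (out : (List (String × List String)) × (List (String × String)) × Int) : Decidable (Spec_find_devices lines out) := by unfold Spec_find_devices; infer_instance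

-- ===== CLAIM (what is proved, stated in full; the proofs are below) =====
def Claim_equal_find_devices : Prop := ∀ (lines : List String), Dom_find_devices lines → Spec_find_devices lines (find_devices lines)

-- ===== LEMMAS AND PROOFS =====

-- A's first-occurrence loop, isolated (proof-only characterisation of A)
def occ_step (occ : PySem.Dict String String) (line : String) : PySem.Dict String String :=
  let fields := PySem.Str.split₀ line
  if 4 ≤ fields.length then
    let device := (PySem.List.pyGet? fields 2).getD ""
    if DESIRED_TYPES.contains (first_char device) && !(occ.contains device) then
      occ.insert device (PySem.Str.join " " [(PySem.List.pyGet? fields 0).getD "",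
                                             (PySem.List.pyGet? fields 1).getD ""])
    else occ
  else occ

def bucket_step (b : PySem.Dict String (List String)) (device : String) :
    PySem.Dict String (List String) :=
  (b.setdefault (first_char device) []).modify (first_char device) [] (fun xs => xs ++ [device])

def regroup (keys : List String) : PySem.Dict String (List String) :=
  keys.foldl bucket_step PySem.Dict.empty

theorem regroup_append (keys : List String) (d : String) :
    regroup (keys ++ [d]) = bucket_step (regroup keys) d := by
  simp [regroup, List.foldl_append]

theorem find?_eq_none_of_contains_false {κ ν : Type} [BEq κ] (d : PySem.Dict κ ν) (k : κ)
    (h : d.contains k = false) : d.items.find? (fun p => p.1 == k) = none := by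
  have h' : d.items.any (fun p => p.1 == k) = false := h
  rw [List.any_eq_false] at h'
  rw [List.find?_eq_none]
  intro p hp
  simpa using h' p hp

theorem getD_of_contains_false {κ ν : Type} [BEq κ] (d : PySem.Dict κ ν) (k : κ) (dflt : ν)
    (h : d.contains k = false) : d.getD k dflt = dflt := by
  simp [PySem.Dict.getD, PySem.Dict.get?, find?_eq_none_of_contains_false d k h]

theorem modify_fresh_append {κ ν : Type} [BEq κ] (items : List (κ × ν)) (k : κ) (v0 dflt : ν)
    (f : ν → ν) (hno : ∀ p ∈ items, (p.1 == k) = false) (hkk : (k == k) = true) :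
    (PySem.Dict.modify ⟨items ++ [(k, v0)]⟩ k dflt f : PySem.Dict κ ν) = ⟨items ++ [(k, f v0)]⟩ := by
  have hfind : List.find? (fun p => p.1 == k) items = none :=
    List.find?_eq_none.mpr (fun p hp => by simp [hno p hp])
  have hget : (⟨items ++ [(k, v0)]⟩ : PySem.Dict κ ν).getD k dflt = v0 := by
    simp [PySem.Dict.getD, PySem.Dict.get?, List.find?_append, hfind, hkk]
  have hany : (⟨items ++ [(k, v0)]⟩ : PySem.Dict κ ν).contains k = true := by
    simp [PySem.Dict.contains, hkk]
  apply PySem.Dict.ext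
  simp only [PySem.Dict.modify, hget, PySem.Dict.insert, hany, reduceIte, List.map_append]
  simp only [List.map_cons, List.map_nil, hkk, reduceIte]
  rw [(List.map_congr_left fun p hp => by simp [hno p hp] :
        items.map _ = items.map id), List.map_id]

theorem modify_not_contains {κ ν : Type} [BEq κ] (b : PySem.Dict κ ν) (k : κ) (dflt : ν)
    (f : ν → ν) (hno : ∀ p ∈ b.items, (p.1 == k) = false) :
    b.modify k dflt f = (⟨b.items ++ [(k, f dflt)]⟩ : PySem.Dict κ ν) := by
  have hcf : b.contains k = false :=
    List.any_eq_false.mpr (fun p hp => by simp [hno p hp])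
  have hget : b.getD k dflt = dflt := getD_of_contains_false b k dflt hcf
  apply PySem.Dict.ext
  simp only [PySem.Dict.modify, hget, PySem.Dict.insert, hcf, Bool.false_eq_true, reduceIte]

theorem bucket_step_eq_modify (b : PySem.Dict String (List String)) (d : String) :
    bucket_step b d = b.modify (first_char d) [] (fun xs => xs ++ [d]) := by
  unfold bucket_step
  by_cases h : b.contains (first_char d) = true
  · simp only [PySem.Dict.setdefault, h, if_true]
  · have hf : b.contains (first_char d) = false := by simpa using h
    have hno : ∀ p ∈ b.items, (p.1 == first_char d) = false := fun p hp => by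
      have h' : b.items.any (fun p => p.1 == first_char d) = false := hf
      rw [List.any_eq_false] at h'
      simpa using h' p hp
    have hsd : b.setdefault (first_char d) [] = ⟨b.items ++ [(first_char d, [])]⟩ := by
      simp only [PySem.Dict.setdefault, hf, Bool.false_eq_true, reduceIte]
    rw [hsd, modify_fresh_append b.items _ _ _ _ hno (by simp),
        modify_not_contains b _ _ _ hno]

theorem regroup_getD (keys : List String) (t : String) :
    (regroup keys).getD t [] = keys.filter (fun x => first_char x == t) := by
  have h1 : regroup keys
      = (keys.map (fun x => (first_char x, x))).foldl
          (fun d p => d.modify p.1 [] (fun xs => xs ++ [p.2])) PySem.Dict.empty := by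
    rw [List.foldl_map]
    unfold regroup
    congr 1
    funext b x
    exact bucket_step_eq_modify b x
  rw [h1, PySem.Dict.getD_foldl_modify_append]
  have hemp : (PySem.Dict.empty : PySem.Dict String (List String)).getD t [] = [] := rfl
  rw [hemp]
  simp [List.filter_map, Function.comp_def]

theorem contains_of_getD_ne {κ ν : Type} [BEq κ] (d : PySem.Dict κ ν) (k : κ) (dflt : ν)
    (h : d.getD k dflt ≠ dflt) : d.contains k = true := by
  by_contra hc
  exact h (getD_of_contains_false d k dflt (by simpa using hc))

theorem regroup_contains_mem (keys : List String) (d : String) (hd : d ∈ keys) :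
    ((regroup keys).getD (first_char d) []).contains d = true
      ∧ (regroup keys).contains (first_char d) = true := by
  have h1 : ((regroup keys).getD (first_char d) []).contains d = true := by
    rw [regroup_getD]
    simp only [List.contains_eq_mem, decide_eq_true_eq, List.mem_filter]
    exact ⟨hd, by simp⟩
  refine ⟨h1, contains_of_getD_ne (regroup keys) (first_char d) [] ?_⟩
  intro h
  rw [h] at h1
  simp at h1

theorem regroup_not_mem (keys : List String) (d : String) (hd : d ∉ keys) :
    ((regroup keys).getD (first_char d) []).contains d = false := by
  rw [regroup_getD]
  simp only [List.contains_eq_mem, decide_eq_false_iff_not, List.mem_filter]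
  intro ⟨h, _⟩
  exact hd h

theorem contains_iff_mem_keys {ν : Type} (d : PySem.Dict String ν) (k : String) :
    d.contains k = true ↔ k ∈ d.keys := by
  simp [PySem.Dict.contains, PySem.Dict.keys, List.any_eq_true]

theorem insert_fresh {ν : Type} (d : PySem.Dict String ν) (k : String) (v : ν)
    (h : d.contains k = false) :
    (d.insert k v).items = d.items ++ [(k, v)] := by
  simp [PySem.Dict.insert, h]

-- A's loop state is (regroup of the seen keys, the first-occurrence dict, its size)
set_option maxHeartbeats 1000000 in
theorem step_eq (occ : PySem.Dict String String) (line : String) (hnd : occ.keys.Nodup) :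
    find_devices_step (regroup occ.keys, occ, (occ.size : Int)) line
      = (regroup (occ_step occ line).keys, occ_step occ line, ((occ_step occ line).size : Int))
    ∧ (occ_step occ line).keys.Nodup := by
  unfold find_devices_step occ_step
  by_cases hwf : 4 ≤ (PySem.Str.split₀ line).length
  case neg =>
    have h1 : is_well_formed line = false := by simp [is_well_formed, hwf]
    rw [h1]
    simp only [Bool.false_eq_true, if_false, if_neg hwf]
    exact ⟨trivial, hnd⟩
  case pos =>
    have h1 : is_well_formed line = true := by simp [is_well_formed, hwf]
    rw [h1]
    simp only [if_true, if_pos hwf]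
    have hgt : get_device_type = first_char := rfl
    simp only [get_device, hgt]
    set device := (PySem.List.pyGet? (PySem.Str.split₀ line) 2).getD "" with hdev
    by_cases hdes : DESIRED_TYPES.contains (first_char device) = true
    case neg =>
      have hdes' : DESIRED_TYPES.contains (first_char device) = false := by simpa using hdes
      rw [hdes']
      simp only [Bool.false_eq_true, if_false, Bool.false_and, Bool.and_self]
      exact ⟨trivial, hnd⟩
    case pos =>
      rw [hdes]
      simp only [if_true, Bool.true_and]
      by_cases hmem : occ.contains device = true
      case pos =>
        have hk : device ∈ occ.keys := (contains_iff_mem_keys occ device).mp hmem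
        obtain ⟨hbd, hbt⟩ := regroup_contains_mem occ.keys device hk
        rw [hmem, hbt, hbd]
        refine ⟨?_, hnd⟩
        simp
      case neg =>
        have hco : occ.contains device = false := by simpa using hmem
        have hk : device ∉ occ.keys := fun h => by
          rw [(contains_iff_mem_keys occ device).mpr h] at hco
          cases hco
        rw [hco]
        simp only [Bool.not_false, Bool.and_true, if_true]
        set ts := PySem.Str.join " " [(PySem.List.pyGet? (PySem.Str.split₀ line) 0).getD "",
            (PySem.List.pyGet? (PySem.Str.split₀ line) 1).getD ""] with hts
        have hts' : get_timestamp line = ts := rfl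
        rw [hts']
        have hitems : (occ.insert device ts).items = occ.items ++ [(device, ts)] :=
          insert_fresh occ device ts hco
        have hkeys : (occ.insert device ts).keys = occ.keys ++ [device] := by
          simp [PySem.Dict.keys, hitems]
        have hsize : ((occ.insert device ts).size : Int) = (occ.size : Int) + 1 := by
          simp [PySem.Dict.size, hitems]
        have hnd' : (occ.insert device ts).keys.Nodup := by
          rw [hkeys]
          apply List.Nodup.append hnd (List.nodup_singleton device)
          intro a ha hb
          rw [List.mem_singleton] at hb
          exact hk (hb ▸ ha)
        have hregro : regroup (occ.insert device ts).keys
            = (regroup occ.keys).modify (first_char device) [] (fun xs => xs ++ [device]) := by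
          rw [hkeys, regroup_append, bucket_step_eq_modify]
        refine ⟨?_, hnd'⟩
        by_cases hbt : (regroup occ.keys).contains (first_char device) = true
        case pos =>
          have hnb := regroup_not_mem occ.keys device hk
          rw [hbt, hnb]
          simp only [Bool.true_eq_false, if_false, if_true]
          rw [hregro, hsize]
        case neg =>
          have hbf : (regroup occ.keys).contains (first_char device) = false := by
            simpa using hbt
          rw [hbf]
          simp only [if_true]
          rw [hregro, hsize, PySem.Dict.modify, getD_of_contains_false _ _ _ hbf]
          simp

theorem loop_eq (lines : List String) :
    ∀ (occ : PySem.Dict String String), occ.keys.Nodup →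
    lines.foldl find_devices_step (regroup occ.keys, occ, (occ.size : Int))
      = (regroup (lines.foldl occ_step occ).keys, lines.foldl occ_step occ,
         ((lines.foldl occ_step occ).size : Int)) := by
  induction lines with
  | nil => intro occ _; rfl
  | cons line rest ih =>
    intro occ hnd
    obtain ⟨h1, h2⟩ := step_eq occ line hnd
    simp only [List.foldl_cons, h1]
    exact ih (occ_step occ line) h2

-- ---------- B-side characterisation ----------

-- one eligible occurrence, as an Option
def g (p : Int × String) : Option (Int × String × String) :=
  let fields := PySem.Str.split₀ p.2
  if 4 ≤ fields.length then
    if DESIRED_TYPES.contains (first_char ((PySem.List.pyGet? fields 2).getD "")) then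
      some (p.1, (PySem.List.pyGet? fields 2).getD "",
            PySem.Str.join " " [(PySem.List.pyGet? fields 0).getD "",
                                (PySem.List.pyGet? fields 1).getD ""])
    else none
  else none

theorem collect_step_eq (acc : List (Int × String × String)) (p : Int × String) :
    collect_step acc p = acc ++ (g p).toList := by
  simp only [collect_step, g]
  split_ifs <;> simp

theorem collect_eq_filterMap (l : List (Int × String)) :
    ∀ acc, l.foldl collect_step acc = acc ++ l.filterMap g := by
  induction l with
  | nil => intro acc; simp
  | cons x t ih =>
    intro acc
    rw [List.foldl_cons, ih, collect_step_eq, List.filterMap_cons]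
    cases hg : g x <;> simp

-- first-wins fold (the semantic content of A's occ loop, with the index carried along)
def fw_step (d : PySem.Dict String (Int × String)) (t : Int × String × String) :
    PySem.Dict String (Int × String) :=
  if d.contains t.2.1 then d else d.insert t.2.1 (t.1, t.2.2)

-- drop the index component of every value
def projD (d : PySem.Dict String (Int × String)) : PySem.Dict String String :=
  ⟨d.items.map (fun p => (p.1, p.2.2))⟩

theorem projD_contains (d : PySem.Dict String (Int × String)) (k : String) :
    (projD d).contains k = d.contains k := by
  simp [projD, PySem.Dict.contains, List.any_map, Function.comp_def]

theorem projD_keys (d : PySem.Dict String (Int × String)) :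
    (projD d).keys = d.keys := by
  simp [projD, PySem.Dict.keys, List.map_map, Function.comp_def]

theorem projD_items (d : PySem.Dict String (Int × String)) :
    (projD d).items = d.items.map (fun p => (p.1, p.2.2)) := rfl

theorem projD_insert (d : PySem.Dict String (Int × String)) (k : String) (v : Int × String) :
    projD (d.insert k v) = (projD d).insert k v.2 := by
  apply PySem.Dict.ext
  by_cases h : d.contains k = true
  · have h2 : (projD d).contains k = true := by rw [projD_contains]; exact h
    rw [projD_items, PySem.Dict.items_insert_of_contains d v h,
        PySem.Dict.items_insert_of_contains (projD d) v.2 h2, projD_items,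
        List.map_map, List.map_map]
    apply List.map_congr_left
    intro p _
    by_cases hp : (p.1 == k) = true <;> simp [hp, Function.comp]
  · have h' : d.contains k = false := by simpa using h
    have h2 : (projD d).contains k = false := by rw [projD_contains]; exact h'
    rw [projD_items, PySem.Dict.items_insert_of_not_contains d v h',
        PySem.Dict.items_insert_of_not_contains (projD d) v.2 h2, projD_items]
    simp

-- A's occ loop over the lines IS the first-wins fold over the eligible occurrences
theorem occ_eq_fw (lines : List String) :
    ∀ (s : Int) (d : PySem.Dict String (Int × String)),
      lines.foldl occ_step (projD d)
        = projD (((PySem.List.enumerate lines s).filterMap g).foldl fw_step d) := by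
  induction lines with
  | nil => intro s d; simp [PySem.List.enumerate_nil]
  | cons line rest ih =>
    intro s d
    rw [PySem.List.enumerate_cons, List.filterMap_cons, List.foldl_cons]
    have hstep : occ_step (projD d) line = projD (match g (s, line) with
        | some t => fw_step d t
        | none => d) := by
      unfold occ_step g
      by_cases hwf : 4 ≤ (PySem.Str.split₀ line).length
      · simp only [hwf, if_true]
        set device := (PySem.List.pyGet? (PySem.Str.split₀ line) 2).getD "" with hdev
        by_cases hdes : DESIRED_TYPES.contains (first_char device) = true
        · simp only [hdes, if_true, Bool.true_and, fw_step, projD_contains]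
          by_cases hc : d.contains device = true
          · simp [hc]
          · have hc' : d.contains device = false := by simpa using hc
            simp [hc', projD_insert]
        · have hdes' : DESIRED_TYPES.contains (first_char device) = false := by simpa using hdes
          have hdes2 : first_char device ∉ DESIRED_TYPES := by simpa using hdes
          simp [hdes', hdes2]
      · simp [hwf]
    cases hg : g (s, line) with
    | none => rw [hg] at hstep; simp only [hstep]; exact ih (s + 1) d
    | some t =>
      rw [hg] at hstep
      simp only [hstep, List.foldl_cons]
      exact ih (s + 1) (fw_step d t)

theorem fw_nodup_keys (l : List (Int × String × String)) :
    ∀ (d : PySem.Dict String (Int × String)), d.keys.Nodup → (l.foldl fw_step d).keys.Nodup := by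
  induction l with
  | nil => intro d h; exact h
  | cons x t ih =>
    intro d h
    rw [List.foldl_cons]
    apply ih
    unfold fw_step
    split_ifs with hc
    · exact h
    · exact PySem.Dict.nodup_keys_insert d _ _ h

-- the items of a first-wins fold are a sublist of the start items followed by the reshaped input
theorem fw_items_sublist (l : List (Int × String × String)) :
    ∀ (d : PySem.Dict String (Int × String)),
      (l.foldl fw_step d).items.Sublist (d.items ++ l.map (fun t => (t.2.1, (t.1, t.2.2)))) := by
  induction l with
  | nil => intro d; simp
  | cons x t ih =>
    intro d
    rw [List.foldl_cons]
    unfold fw_step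
    split_ifs with hc
    · exact (ih d).trans (by
        apply List.Sublist.append_left
        simp [List.map_cons])
    · have h1 := ih (d.insert x.2.1 (x.1, x.2.2))
      have hi : (d.insert x.2.1 (x.1, x.2.2)).items = d.items ++ [(x.2.1, (x.1, x.2.2))] :=
        insert_fresh d _ _ (by simpa using hc)
      rw [hi] at h1
      refine h1.trans ?_
      simp [List.map_cons, List.append_assoc]

-- get? of a first-wins fold from d: keys of d keep their value, new keys take the empty-start value
theorem fw_get?_start (l : List (Int × String × String)) :
    ∀ (d : PySem.Dict String (Int × String)) (k : String),
      (l.foldl fw_step d).get? k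
        = ((d.get? k).or ((l.foldl fw_step PySem.Dict.empty).get? k)) := by
  induction l with
  | nil => intro d k; simp [PySem.Dict.get?_empty]
  | cons x t ih =>
    intro d k
    rw [List.foldl_cons, List.foldl_cons]
    have hemp : fw_step PySem.Dict.empty x = PySem.Dict.empty.insert x.2.1 (x.1, x.2.2) := by
      simp [fw_step, PySem.Dict.contains_empty]
    rw [hemp]
    by_cases hc : d.contains x.2.1 = true
    · have hd : fw_step d x = d := by simp [fw_step, hc]
      rw [hd, ih d k, ih (PySem.Dict.empty.insert x.2.1 (x.1, x.2.2)) k]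
      by_cases hk : k = x.2.1
      · rw [hk, PySem.Dict.get?_insert_self]
        have hds : (d.get? x.2.1).isSome := by
          rw [← PySem.Dict.contains_eq_isSome_get?]; exact hc
        cases hdk : d.get? x.2.1 with
        | none => rw [hdk] at hds; simp at hds
        | some v => simp [Option.or]
      · rw [PySem.Dict.get?_insert_of_ne _ _ hk, PySem.Dict.get?_empty]
        simp [Option.or]
    · have hcf : d.contains x.2.1 = false := by simpa using hc
      have hd : fw_step d x = d.insert x.2.1 (x.1, x.2.2) := by simp [fw_step, hcf]
      rw [hd, ih (d.insert x.2.1 (x.1, x.2.2)) k,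
          ih (PySem.Dict.empty.insert x.2.1 (x.1, x.2.2)) k]
      by_cases hk : k = x.2.1
      · have hdn : d.get? x.2.1 = none :=
          (PySem.Dict.get?_eq_none_iff_contains d x.2.1).mpr hcf
        rw [hk, hdn, PySem.Dict.get?_insert_self, PySem.Dict.get?_insert_self]
        simp [Option.or]
      · rw [PySem.Dict.get?_insert_of_ne _ _ hk, PySem.Dict.get?_insert_of_ne _ _ hk,
            PySem.Dict.get?_empty]
        simp [Option.or]

-- last-write-wins over the reversed list = first-wins over the list (pointwise get?)
theorem lw_rev_get?_eq_fw (l : List (Int × String × String)) (k : String) :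
    (l.reverse.foldl (fun d (t : Int × String × String) => d.insert t.2.1 (t.1, t.2.2))
        PySem.Dict.empty).get? k
      = (l.foldl fw_step PySem.Dict.empty).get? k := by
  induction l with
  | nil => rfl
  | cons x t ih =>
    rw [List.reverse_cons, List.foldl_append, List.foldl_cons, List.foldl_nil, List.foldl_cons]
    have hemp : fw_step PySem.Dict.empty x = PySem.Dict.empty.insert x.2.1 (x.1, x.2.2) := by
      simp [fw_step, PySem.Dict.contains_empty]
    rw [hemp, fw_get?_start t (PySem.Dict.empty.insert x.2.1 (x.1, x.2.2)) k]
    by_cases hk : k = x.2.1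
    · rw [hk, PySem.Dict.get?_insert_self, PySem.Dict.get?_insert_self]
      simp [Option.or]
    · rw [PySem.Dict.get?_insert_of_ne _ _ hk, PySem.Dict.get?_insert_of_ne _ _ hk,
          PySem.Dict.get?_empty, ih]
      simp [Option.or]

-- two dicts with unique keys and identical lookups have permuted item lists
theorem items_perm_of_get?_eq {ν : Type} [DecidableEq ν] (d1 d2 : PySem.Dict String ν)
    (h1 : d1.keys.Nodup) (h2 : d2.keys.Nodup) (h : ∀ k, d1.get? k = d2.get? k) :
    d1.items.Perm d2.items := by
  have hn1 : d1.items.Nodup := h1.of_map _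
  have hn2 : d2.items.Nodup := h2.of_map _
  rw [List.perm_ext_iff_of_nodup hn1 hn2]
  intro p
  obtain ⟨k, v⟩ := p
  rw [← PySem.Dict.get?_eq_some_iff_mem_items d1 k v h1,
      ← PySem.Dict.get?_eq_some_iff_mem_items d2 k v h2, h k]

-- indices in the eligible-occurrence list strictly increase
theorem elig_pairwise (lines : List String) (s : Int) :
    ((PySem.List.enumerate lines s).filterMap g).Pairwise (fun a b => a.1 < b.1) := by
  have he : (PySem.List.enumerate lines s).Pairwise (fun a b => a.1 < b.1) := by
    induction lines generalizing s with
    | nil => simp [PySem.List.enumerate_nil]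
    | cons x t ih =>
      rw [PySem.List.enumerate_cons]
      refine List.Pairwise.cons ?_ (ih (s + 1))
      intro b hb
      have : b.1 ∈ (PySem.List.enumerate t (s + 1)).map (·.1) := List.mem_map_of_mem hb
      rw [PySem.List.map_fst_enumerate, PySem.List.mem_pyRange_one] at this
      omega
  refine List.Pairwise.filterMap g ?_ he
  intro a b hab x hx y hy
  simp only [g] at hx hy
  split_ifs at hx hy <;> simp_all
  subst hx
  subst hy
  simpa using hab

-- ---------- assembling the equivalence ----------

theorem find_devices_spec' (lines : List String) :
    find_devices lines = find_devices_alt lines := by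
  -- A's side, characterised
  have hemp : (PySem.Dict.empty : PySem.Dict String String).keys = [] := rfl
  have hA := loop_eq lines PySem.Dict.empty (by rw [hemp]; exact List.nodup_nil)
  rw [hemp] at hA
  have h0 : regroup [] = PySem.Dict.empty := rfl
  have hs : ((PySem.Dict.empty : PySem.Dict String String).size : Int) = 0 := rfl
  rw [h0, hs] at hA
  set O := lines.foldl occ_step PySem.Dict.empty with hO
  -- B's side
  set E := (PySem.List.enumerate lines 0).filterMap g with hE
  set F := E.foldl fw_step PySem.Dict.empty with hF
  have hOF : O = projD F := by
    have := occ_eq_fw lines 0 PySem.Dict.empty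
    have hpe : projD PySem.Dict.empty = PySem.Dict.empty := rfl
    rw [hpe] at this
    exact this
  have hFnd : F.keys.Nodup := fw_nodup_keys E PySem.Dict.empty (by simp)
  -- the reverse-overwrite dict
  set G := ((PySem.List.enumerate lines).foldl collect_step []).reverse.foldl
      (fun d (t : Int × String × String) => d.insert t.2.1 (t.1, t.2.2)) PySem.Dict.empty with hG
  have hcoll : (PySem.List.enumerate lines).foldl collect_step [] = E := by
    rw [collect_eq_filterMap, List.nil_append]
  have hGnd : G.keys.Nodup := by
    rw [hG]
    exact PySem.Dict.nodup_keys_foldl_insert_key _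
      (fun (t : Int × String × String) => t.2.1) (fun _ t => (t.1, t.2.2))
      PySem.Dict.empty (by simp)
  have hGF : ∀ k, G.get? k = F.get? k := by
    intro k
    rw [hG, hcoll, hF]
    exact lw_rev_get?_eq_fw E k
  have hperm : F.items.Perm G.items :=
    (items_perm_of_get?_eq G F hGnd hFnd hGF).symm
  -- F.items is strictly increasing in the index key
  have hFpw : F.items.Pairwise (fun a b => a.2.1 < b.2.1) := by
    have hsub := fw_items_sublist E PySem.Dict.empty
    have hepw : (E.map (fun t => (t.2.1, (t.1, t.2.2)))).Pairwise
        (fun (a b : String × Int × String) => a.2.1 < b.2.1) := by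
      rw [List.pairwise_map]
      exact elig_pairwise lines 0
    have : ((PySem.Dict.empty : PySem.Dict String (Int × String)).items
        ++ E.map (fun t => (t.2.1, (t.1, t.2.2)))).Pairwise
        (fun (a b : String × Int × String) => a.2.1 < b.2.1) := by
      simpa [PySem.Dict.items] using hepw
    exact this.sublist (hsub)
  -- the sorted list IS F.items
  have hsorted : PySem.List.sorted G.items (fun item => item.2.1) false = F.items :=
    PySem.List.sorted_eq_of_perm_of_pairwise_lt G.items F.items (fun item => item.2.1) hperm hFpw
  -- the final fold, componentwise
  have hsplit : ∀ (l : List (String × Int × String))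
      (a : PySem.Dict String String) (b : PySem.Dict String (List String)),
      l.foldl pair_step (a, b)
        = (l.foldl (fun d p => d.insert p.1 p.2.2) a, l.foldl (fun d p => bucket_step d p.1) b) := by
    intro l
    induction l with
    | nil => intro a b; rfl
    | cons x t ih => intro a b; rw [List.foldl_cons, List.foldl_cons, List.foldl_cons]; exact ih _ _
  -- firsts dict: fresh distinct keys, so the items append up to exactly F.items projected
  have hfresh : (F.items.foldl (fun d p => d.insert p.1 p.2.2)
      (PySem.Dict.empty : PySem.Dict String String)).items
        = F.items.map (fun p => (p.1, p.2.2)) := by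
    have := PySem.Dict.items_foldl_insert_fresh (l := F.items) (k := fun p => p.1)
      (v := fun p => p.2.2) (d := (PySem.Dict.empty : PySem.Dict String String))
      (by intro a _; simp) (by simpa [PySem.Dict.keys] using hFnd)
    simpa [PySem.Dict.items] using this
  -- buckets: the per-item bucket pass is regroup of the key list
  have hbuck : F.items.foldl (fun d p => bucket_step d p.1)
      (PySem.Dict.empty : PySem.Dict String (List String)) = regroup F.keys := by
    rw [regroup, ← List.foldl_map (f := fun (p : String × Int × String) => p.1) (g := bucket_step)]
    rfl
  -- put everything together
  have hKeys : O.keys = F.keys := by rw [hOF, projD_keys]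
  have hItems : O.items = F.items.map (fun p => (p.1, p.2.2)) := by rw [hOF]; rfl
  have hSize : (O.size : Int) = (F.items.length : Int) := by
    rw [hOF]; simp [PySem.Dict.size, projD]
  show ((lines.foldl find_devices_step (PySem.Dict.empty, PySem.Dict.empty, 0)).1.items,
        (lines.foldl find_devices_step (PySem.Dict.empty, PySem.Dict.empty, 0)).2.1.items,
        (lines.foldl find_devices_step (PySem.Dict.empty, PySem.Dict.empty, 0)).2.2)
      = (((PySem.List.sorted G.items (fun item => item.2.1) false).foldl pair_step
            (PySem.Dict.empty, PySem.Dict.empty)).2.items,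
         ((PySem.List.sorted G.items (fun item => item.2.1) false).foldl pair_step
            (PySem.Dict.empty, PySem.Dict.empty)).1.items,
         ((PySem.List.sorted G.items (fun item => item.2.1) false).length : Int))
  rw [hA, hsorted, hsplit]
  simp only
  rw [hfresh, hbuck, hKeys, hItems, hSize]

-- ===== VERDICT (by name: the statement is the Claim_ definition above) =====
theorem find_devices_spec : Claim_equal_find_devices := by
  intro lines _
  unfold Spec_find_devices
  exact find_devices_spec' lines
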